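-- pv_equiv track=rewrite | github.com/Kawser-nerd/CLCDSA | Source Codes/AtCoder/abc017/B/4808982.py | judge_choku
-- ===== SOURCE A (Python) =====
-- def judge_choku(str):
--     isChoku = 1
--     while isChoku:
--         if (str == ""):
--             break
--         elif (str[0] == "o" or str[0] == "k" or str[0] == "u"):
--             str = str[1:]
--             judge_choku(str)
--         elif (str[:2] == "ch"):
--             str = str[2:]
--             judge_choku(str)
--         else:
--             isChoku = 0
--     return isChoku
-- ===== SOURCE B (Python) =====
-- def judge_choku(str):
--     # Single linear scan with an index pointer: no slicing, no recursion.
--     i = 0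
--     n = len(str)
--     while i < n:
--         c = str[i]
--         if c == "o" or c == "k" or c == "u":
--             i += 1
--         elif c == "c" and i + 1 < n and str[i + 1] == "h":
--             i += 2
--         else:
--             return 0
--     return 1
-- ===== Notes on version B (the rewrite author's own statement) =====
-- stated objective: alternative
-- what changed: Replaces A's repeated string slicing and redundant discarded recursive calls with one linear index-pointer scan over the string.
import Mathlib
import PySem

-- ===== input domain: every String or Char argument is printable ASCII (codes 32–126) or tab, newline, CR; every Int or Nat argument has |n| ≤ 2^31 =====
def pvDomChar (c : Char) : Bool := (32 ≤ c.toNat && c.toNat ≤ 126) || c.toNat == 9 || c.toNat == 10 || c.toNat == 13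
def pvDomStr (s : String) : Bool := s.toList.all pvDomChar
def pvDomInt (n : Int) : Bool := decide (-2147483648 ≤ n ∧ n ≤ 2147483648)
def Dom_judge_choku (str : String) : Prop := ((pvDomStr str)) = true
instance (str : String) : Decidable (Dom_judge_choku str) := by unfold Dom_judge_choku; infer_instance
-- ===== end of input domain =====

-- B replaces A's repeated slicing (and discarded redundant recursive calls) with one linear index-pointer scan (objective: alternative).

-- ===== PORT A =====
-- A's while loop as structural recursion on the character list; the inner
-- 'judge_choku(str)' calls in A are pure and their results discarded, so they
-- do not appear (they have no effect on the returned value).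
def judgeLoopA : List Char → Int
  | [] => 1                              -- if str == "": break; return isChoku (=1)
  | c :: rest =>
    if c = 'o' ∨ c = 'k' ∨ c = 'u' then  -- str[0] in "oku"
      judgeLoopA rest                     -- str = str[1:]
    else if PySem.List.slice (c :: rest) none (some 2) = ['c', 'h'] then  -- str[:2] == "ch"
      judgeLoopA (PySem.List.slice (c :: rest) (some 2) none)             -- str = str[2:]
    else 0                               -- isChoku = 0; return it
  termination_by l => l.length
  decreasing_by
    · simp
    · rw [PySem.List.slice_from _ (by norm_num)]; simp

def judge_choku (str : String) : Int := judgeLoopA str.toList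

-- ===== PORT B =====
-- Source B's while loop: index pointer i over the fixed character list, no slicing.
def judgeScanB (l : List Char) (n : Nat) (i : Nat) : Int :=
  if i < n then
    let c := l.getD i ' '
    if c = 'o' ∨ c = 'k' ∨ c = 'u' then
      judgeScanB l n (i + 1)
    else if c = 'c' ∧ i + 1 < n ∧ l.getD (i + 1) ' ' = 'h' then
      judgeScanB l n (i + 2)
    else 0
  else 1
  termination_by n - i

def judge_choku_alt (str : String) : Int := judgeScanB str.toList str.toList.length 0

-- ===== PRECONDITION & SPEC =====
def Spec_judge_choku (str : String) (out : Int) : Prop := out = judge_choku_alt str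
instance (str : String) (out : Int) : Decidable (Spec_judge_choku str out) := by unfold Spec_judge_choku; infer_instance

-- ===== CLAIM (what is proved, stated in full; the proofs are below) =====
def Claim_equal_judge_choku : Prop := ∀ (str : String), Dom_judge_choku str → Spec_judge_choku str (judge_choku str)

-- ===== LEMMAS AND PROOFS =====

theorem judgeScanB_eq_loopA (l : List Char) (i : Nat) :
    judgeScanB l l.length i = judgeLoopA (l.drop i) := by
  by_cases h : i < l.length
  · have hd : l.drop i = l[i] :: l.drop (i + 1) := List.drop_eq_getElem_cons h
    have hget : l.getD i ' ' = l[i] := List.getD_eq_getElem l ' ' h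
    rw [judgeScanB, if_pos h, hd]
    simp only [judgeLoopA, hget]
    by_cases h1 : l[i] = 'o' ∨ l[i] = 'k' ∨ l[i] = 'u'
    · rw [if_pos h1, if_pos h1, judgeScanB_eq_loopA l (i + 1)]
    · rw [if_neg h1, if_neg h1]
      by_cases h2 : i + 1 < l.length
      · have hd2 : l.drop (i + 1) = l[i + 1] :: l.drop (i + 2) := List.drop_eq_getElem_cons h2
        have hget2 : l.getD (i + 1) ' ' = l[i + 1] := List.getD_eq_getElem l ' ' h2
        have hA2 : PySem.List.slice (l[i] :: l.drop (i + 1)) (some 2) none = l.drop (i + 2) := by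
          rw [PySem.List.slice_from _ (by norm_num), hd2]
          simp
        by_cases h3 : l[i] = 'c' ∧ l[i + 1] = 'h'
        · rw [if_pos ⟨h3.1, h2, hget2 ▸ h3.2⟩,
            if_pos (by rw [hd2, PySem.List.slice_to _ (by norm_num)]; simp [h3.1, h3.2, show (2:Int).toNat = 2 from rfl]),
            hA2]
          exact judgeScanB_eq_loopA l (i + 2)
        · rw [if_neg (by rw [hget2]; tauto),
            if_neg (by
              rw [hd2, PySem.List.slice_to _ (by norm_num)]
              simp only [show (2:Int).toNat = 2 from rfl, List.take_succ_cons, List.take_zero]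
              simp; tauto)]
      · have hd2 : l.drop (i + 1) = [] := List.drop_eq_nil_of_le (by omega)
        rw [if_neg (by tauto),
          if_neg (by rw [hd2, PySem.List.slice_to _ (by norm_num)]; simp)]
  · rw [judgeScanB, if_neg h, List.drop_eq_nil_of_le (by omega), judgeLoopA]
termination_by l.length - i
decreasing_by all_goals omega

-- ===== VERDICT (by name: the statement is the Claim_ definition above) =====
theorem judge_choku_spec : Claim_equal_judge_choku := by
  intro str _
  unfold Spec_judge_choku judge_choku judge_choku_alt
  rw [judgeScanB_eq_loopA, List.drop_zero]
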